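-- pv_equiv track=rewrite | github.com/bluenote28/biblecatholic | biblecatholicmain.py | build_quotes_list
-- ===== SOURCE A (Python) =====
-- def build_quotes_list(quotes_string):
--     curr_index = 1
--     end_index = quotes_string.index(']')
--     quote_list = []
--     new_string = ""
--
--
--     while curr_index < end_index:
--         if quotes_string[curr_index] == ',' and quotes_string[curr_index - 1] == '\"' or quotes_string[curr_index] == ',' and quotes_string[curr_index - 1] == '\'':
--             quote_list.append(new_string)
--             new_string = ""
--             curr_index += 1
--         else:
--             new_string += quotes_string[curr_index]
--             curr_index +=1
--     quote_list.append(new_string)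
--     return quote_list
-- ===== SOURCE B (Python) =====
-- def build_quotes_list(quotes_string):
--     end = quotes_string.index(']')
--     cuts = [i for i in range(1, end)
--             if quotes_string[i] == ',' and quotes_string[i - 1] in '\'"']
--     starts = [1] + [c + 1 for c in cuts]
--     stops = cuts + [end]
--     return [quotes_string[a:b] for a, b in zip(starts, stops)]
-- ===== Notes on version B (the rewrite author's own statement) =====
-- stated objective: idiomatic
-- what changed: A's manual automaton (walk the string char by char, accumulating the current segment in a growing string and resetting it at each quote-preceded comma) is replaced by collecting the cut positions with a comprehension and slicing the string between consecutive cuts via zip of start/stop positions.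
import Mathlib
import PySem

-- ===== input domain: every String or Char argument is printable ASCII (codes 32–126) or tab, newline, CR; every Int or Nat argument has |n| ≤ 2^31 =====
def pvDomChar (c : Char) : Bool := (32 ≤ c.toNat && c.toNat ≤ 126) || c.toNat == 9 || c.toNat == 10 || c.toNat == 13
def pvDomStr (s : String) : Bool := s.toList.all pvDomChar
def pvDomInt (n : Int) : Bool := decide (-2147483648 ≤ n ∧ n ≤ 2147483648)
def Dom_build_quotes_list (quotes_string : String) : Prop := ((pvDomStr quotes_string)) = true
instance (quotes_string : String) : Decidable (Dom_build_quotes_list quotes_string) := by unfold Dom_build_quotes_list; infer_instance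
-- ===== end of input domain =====

-- B replaces A's character-by-character accumulation loop with "collect the cut positions,
-- then slice the string between them" (objective: idiomatic/alternative, not claimed faster).

-- ===== PORT A =====
-- the while loop of A: curr_index counts up to end_index, new_string accumulates chars,
-- quote_list collects finished segments (strings kept as List Char while accumulating;
-- indexing via getD is exact here because every index used is < end_index < length)
def pvLoopA (cs : List Char) (endIdx i : Nat) (newStr : List Char) (ql : List String) :
    List String :=
  if i < endIdx then
    if (cs.getD i ' ' = ',' ∧ cs.getD (i - 1) ' ' = '"') ∨
       (cs.getD i ' ' = ',' ∧ cs.getD (i - 1) ' ' = '\'') then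
      pvLoopA cs endIdx (i + 1) [] (ql ++ [String.mk newStr])
    else
      pvLoopA cs endIdx (i + 1) (newStr ++ [cs.getD i ' ']) ql
  else ql ++ [String.mk newStr]
  termination_by endIdx - i

def build_quotes_list (quotes_string : String) : List String :=
  match PySem.List.index? quotes_string.toList ']' with
  | none => []   -- Python raises ValueError here; excluded by Pre_
  | some e => pvLoopA quotes_string.toList e 1 [] []

-- ===== PORT B =====
def build_quotes_list_alt (quotes_string : String) : List String :=
  match PySem.List.index? quotes_string.toList ']' with
  | none => []   -- Python raises ValueError here; excluded by Pre_
  | some e =>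
    let cs := quotes_string.toList
    -- [i for i in range(1, end) if s[i] == ',' and s[i-1] in '\'"']  (indices in range, pyGetD exact)
    let cuts := (PySem.List.pyRange 1 (e : Int) 1).filter (fun i =>
      (PySem.List.pyGetD cs i ' ' == ',') &&
      ((PySem.List.pyGetD cs (i - 1) ' ' == '\'') || (PySem.List.pyGetD cs (i - 1) ' ' == '"')))
    let starts : List Int := 1 :: cuts.map (· + 1)
    let stops : List Int := cuts ++ [(e : Int)]
    (starts.zip stops).map (fun ab =>
      String.mk (PySem.List.slice cs (some ab.1) (some ab.2)))

-- ===== PRECONDITION & SPEC =====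
-- A (and B) raise ValueError when the string has no ']'; exactly those inputs are excluded.
def Pre_build_quotes_list (quotes_string : String) : Prop := ']' ∈ quotes_string.toList
instance (quotes_string : String) : Decidable (Pre_build_quotes_list quotes_string) := by
  unfold Pre_build_quotes_list; infer_instance

def pvWitness_build_quotes_list : String := "['a','b']"

def Spec_build_quotes_list (quotes_string : String) (out : List String) : Prop :=
  out = build_quotes_list_alt quotes_string
instance (quotes_string : String) (out : List String) :
    Decidable (Spec_build_quotes_list quotes_string out) := by
  unfold Spec_build_quotes_list; infer_instance

-- ===== CLAIM (what is proved, stated in full; the proofs are below) =====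
def Claim_equal_build_quotes_list : Prop :=
  ∀ (quotes_string : String), Dom_build_quotes_list quotes_string →
    Pre_build_quotes_list quotes_string →
    Spec_build_quotes_list quotes_string (build_quotes_list quotes_string)

-- ===== LEMMAS AND PROOFS =====

-- the split condition, at Nat index i (used only by the proofs)
def pvIsCut (cs : List Char) (i : Nat) : Bool :=
  (cs.getD i ' ' == ',') && ((cs.getD (i - 1) ' ' == '\'') || (cs.getD (i - 1) ' ' == '"'))

-- the segments of cs between positions start and e, cut after each position in the list
def pvChunks (cs : List Char) (start e : Nat) : List Nat → List (List Char)
  | [] => [(cs.drop start).take (e - start)]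
  | c :: rest => (cs.drop start).take (c - start) :: pvChunks cs (c + 1) e rest

lemma pvChunks_ne_nil (cs : List Char) (start e : Nat) (L : List Nat) :
    pvChunks cs start e L ≠ [] := by
  cases L <;> simp [pvChunks]

lemma modifyHead_nil_append (l : List (List Char)) :
    l.modifyHead (fun h => [] ++ h) = l := by
  cases l <;> simp

lemma pvChunks_step (cs : List Char) (i e : Nat) (L : List Nat)
    (hi : i < e) (he : e ≤ cs.length) (hL : ∀ x ∈ L, i < x) :
    pvChunks cs i e L = (pvChunks cs (i + 1) e L).modifyHead (fun h => cs.getD i ' ' :: h) := by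
  have hil : i < cs.length := lt_of_lt_of_le hi he
  have hdrop : cs.drop i = cs[i] :: cs.drop (i + 1) := List.drop_eq_getElem_cons hil
  have hgetD : cs.getD i ' ' = cs[i] := by simp [List.getD_eq_getElem?_getD, hil]
  cases L with
  | nil =>
    simp only [pvChunks, List.modifyHead, hgetD]
    rw [show e - i = (e - (i + 1)) + 1 by omega, hdrop, List.take_succ_cons]
  | cons c rest =>
    have hc : i < c := hL c (by simp)
    simp only [pvChunks, List.modifyHead, hgetD]
    rw [show c - i = (c - (i + 1)) + 1 by omega, hdrop, List.take_succ_cons]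

-- the cut positions not yet passed at index i
def pvCutsFrom (cs : List Char) (e i : Nat) : List Nat :=
  (List.range' i (e - i)).filter (pvIsCut cs)

lemma pvCutsFrom_gt (cs : List Char) (e i : Nat) : ∀ x ∈ pvCutsFrom cs e (i + 1), i < x := by
  intro x hx
  have := List.mem_range'_1.mp (List.mem_of_mem_filter hx)
  omega

lemma pvCutsFrom_cons (cs : List Char) (e i : Nat) (hi : i < e) :
    pvCutsFrom cs e i =
      if pvIsCut cs i then i :: pvCutsFrom cs e (i + 1) else pvCutsFrom cs e (i + 1) := by
  unfold pvCutsFrom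
  rw [show e - i = (e - (i + 1)) + 1 by omega, List.range'_succ, List.filter_cons]

-- the loop of A computes exactly the chunks between the remaining cut positions
lemma pvLoopA_eq_chunks (cs : List Char) (e : Nat) (he : e ≤ cs.length) :
    ∀ i acc ql, pvLoopA cs e i acc ql =
      ql ++ ((pvChunks cs i e (pvCutsFrom cs e i)).modifyHead (fun h => acc ++ h)).map String.mk := by
  intro i acc ql
  fun_induction pvLoopA cs e i acc ql with
  | case1 i acc ql hlt hcond ih =>
    have hcut : pvIsCut cs i = true := by
      simp only [pvIsCut, Bool.and_eq_true, Bool.or_eq_true, beq_iff_eq]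
      tauto
    rw [ih, pvCutsFrom_cons cs e i hlt, hcut, modifyHead_nil_append]
    simp [pvChunks, List.modifyHead]
  | case2 i acc ql hlt hcond ih =>
    have hcut : pvIsCut cs i = false := by
      simp only [pvIsCut]
      by_contra h
      simp only [Bool.not_eq_false, Bool.and_eq_true, Bool.or_eq_true, beq_iff_eq] at h
      tauto
    rw [ih, pvCutsFrom_cons cs e i hlt, hcut]
    simp only [Bool.false_eq_true, if_false]
    rw [pvChunks_step cs i e _ hlt he (pvCutsFrom_gt cs e i)]
    cases h : pvChunks cs (i + 1) e (pvCutsFrom cs e (i + 1)) with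
    | nil => exact absurd h (pvChunks_ne_nil cs (i + 1) e _)
    | cons hd tl => simp [List.modifyHead]
  | case3 i acc ql hlt =>
    have h0 : pvCutsFrom cs e i = [] := by
      unfold pvCutsFrom
      rw [show e - i = 0 by omega]
      simp
    simp [h0, pvChunks, show e - i = 0 by omega, List.modifyHead]

-- B's zip of start/stop positions over Nat cut positions is pvChunks (all-Nat version)
lemma pvZipN_eq_chunks (cs : List Char) (e : Nat) :
    ∀ (L : List Nat) (s : Nat),
      ((s :: L.map (· + 1)).zip (L ++ [e])).map
        (fun ab => String.mk ((cs.drop ab.1).take (ab.2 - ab.1)))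
      = (pvChunks cs s e L).map String.mk := by
  intro L
  induction L with
  | nil => intro s; simp [pvChunks]
  | cons c rest ih =>
    intro s
    simp only [List.map_cons, List.cons_append, List.zip_cons_cons, pvChunks]
    rw [ih (c + 1)]

-- cast distribution helpers for B's Int-valued lists
lemma pvMap_cast_add_one (L : List Nat) :
    (L.map (Nat.cast : Nat → Int)).map (· + 1) = (L.map (fun c => c + 1)).map (Nat.cast : Nat → Int) := by
  induction L with
  | nil => rfl
  | cons c rest ih =>
    simp only [List.map_cons, ih, List.cons.injEq, and_true]
    exact (Nat.cast_add_one c).symm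

-- B's Int-level cut list is the Nat-level one, cast
lemma pvCuts_eq (cs : List Char) (e : Nat) :
    (PySem.List.pyRange 1 (e : Int) 1).filter (fun i =>
      (PySem.List.pyGetD cs i ' ' == ',') &&
      ((PySem.List.pyGetD cs (i - 1) ' ' == '\'') || (PySem.List.pyGetD cs (i - 1) ' ' == '"')))
    = (pvCutsFrom cs e 1).map (Nat.cast : Nat → Int) := by
  rw [PySem.List.pyRange_one, List.filter_map]
  unfold pvCutsFrom
  rw [List.range'_eq_map_range, List.filter_map, List.map_map]
  rw [show ((e : Int) - 1).toNat = e - 1 by omega]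
  have hfil : ∀ k ∈ List.range (e - 1),
      ((fun i => (PySem.List.pyGetD cs i ' ' == ',') &&
        ((PySem.List.pyGetD cs (i - 1) ' ' == '\'') || (PySem.List.pyGetD cs (i - 1) ' ' == '"')))
        ∘ (fun k : Nat => (1 : Int) + k)) k = ((pvIsCut cs) ∘ (fun x => 1 + x)) k := by
    intro k hk
    simp only [Function.comp_apply]
    rw [show (1 : Int) + (k : Nat) - 1 = ((k : Nat) : Int) by push_cast; ring]
    rw [show (1 : Int) + (k : Nat) = (((1 + k : Nat) : Int)) by push_cast; ring]
    rw [PySem.List.pyGetD_natCast, PySem.List.pyGetD_natCast]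
    simp [pvIsCut]
  rw [List.filter_congr hfil]
  apply List.map_congr_left
  intro k hk
  simp only [Function.comp_apply]
  push_cast
  ring

-- ===== VERDICT (by name: the statement is the Claim_ definition above) =====
theorem build_quotes_list_spec : Claim_equal_build_quotes_list := by
  intro s _ hpre
  unfold Spec_build_quotes_list build_quotes_list build_quotes_list_alt
  have hmem : ']' ∈ s.toList := hpre
  obtain ⟨e, he⟩ :=
    Option.isSome_iff_exists.mp ((PySem.List.index?_isSome_iff s.toList ']').mpr hmem)
  rw [he]
  obtain ⟨helen, -, -⟩ := PySem.List.getElem_of_index?_eq_some he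
  simp only []
  rw [pvCuts_eq s.toList e, pvMap_cast_add_one,
      show (((pvCutsFrom s.toList e 1).map (Nat.cast : Nat → Int)) ++ [(e : Int)])
         = ((pvCutsFrom s.toList e 1) ++ [e]).map (Nat.cast : Nat → Int) by simp,
      show ((1 : Int) :: ((pvCutsFrom s.toList e 1).map (fun c => c + 1)).map (Nat.cast : Nat → Int))
         = ((1 :: (pvCutsFrom s.toList e 1).map (fun c => c + 1)).map (Nat.cast : Nat → Int)) by simp,
      List.zip_map]
  rw [pvLoopA_eq_chunks s.toList e (le_of_lt helen) 1 [] [],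
      modifyHead_nil_append, List.nil_append]
  rw [← pvZipN_eq_chunks s.toList e (pvCutsFrom s.toList e 1) 1]
  rw [List.map_map]
  apply List.map_congr_left
  intro ab hab
  simp only [Function.comp_apply, Prod.map]
  rw [PySem.List.slice_natCast]
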